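-- pv_equiv track=rewrite | github.com/rupampatir/svenprompt | sven/evaler.py | commentify
-- ===== SOURCE A (Python) =====
-- def commentify(input_string, lang):
--     # Split the input string into lines
--     commented_lines = input_string.split('\n')
--     # Add a '#' or '//' at the beginning of each line
--     if lang == 'py':
--         commented_lines = ['# ' + line for line in commented_lines]
--     elif lang == 'c':
--         commented_lines = ['// ' + line for line in commented_lines]
--     else:
--         raise NotImplementedError()
--     # Join the lines back into a single string
--     output_string = '\n'.join(commented_lines)
--
--     return output_string
-- ===== SOURCE B (Python) =====
-- def commentify(input_string, lang):
--     # Pick the comment marker for the language (raise as A does otherwise),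
--     # then do a single substitution pass over the raw string: prefix the start
--     # and every newline with the marker -- no line list, no per-line loop.
--     if lang == 'py':
--         marker = '# '
--     elif lang == 'c':
--         marker = '// '
--     else:
--         raise NotImplementedError()
--     return marker + input_string.replace('\n', '\n' + marker)
-- ===== Notes on version B (the rewrite author's own statement) =====
-- stated objective: idiomatic
-- what changed: B replaces A's split-into-lines / per-line-prefix comprehension / rejoin pipeline with one string substitution: marker + s.replace('\n', '\n' + marker), with no intermediate line list.
import Mathlib
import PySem

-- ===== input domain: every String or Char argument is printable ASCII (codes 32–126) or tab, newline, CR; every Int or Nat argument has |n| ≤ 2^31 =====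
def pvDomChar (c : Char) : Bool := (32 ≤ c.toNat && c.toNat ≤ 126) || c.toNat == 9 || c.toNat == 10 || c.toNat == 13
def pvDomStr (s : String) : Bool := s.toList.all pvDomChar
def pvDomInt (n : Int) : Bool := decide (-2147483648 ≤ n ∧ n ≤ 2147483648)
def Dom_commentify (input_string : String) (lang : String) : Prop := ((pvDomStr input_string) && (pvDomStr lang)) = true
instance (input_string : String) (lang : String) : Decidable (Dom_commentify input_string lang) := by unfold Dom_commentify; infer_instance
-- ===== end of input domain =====

-- B prefixes the marker once and substitutes '\n' -> '\n' + marker in a single pass,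
-- instead of A's split / per-line prefix / join pipeline (idiomatic; same cost).

-- ===== PORT A =====
def commentify (input_string : String) (lang : String) : String :=
  let commented_lines := (PySem.Str.split? input_string "\n").getD []
  if lang == "py" then
    PySem.Str.join "\n" (commented_lines.map (fun line => "# " ++ line))
  else if lang == "c" then
    PySem.Str.join "\n" (commented_lines.map (fun line => "// " ++ line))
  else "" -- Python raises NotImplementedError here; excluded by Pre_commentify

-- ===== PORT B =====
-- marker ++ input_string.replace('\n', '\n' + marker)
def commentB (input_string : String) (marker : String) : String :=
  marker ++ PySem.Str.replace input_string "\n" ("\n" ++ marker)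

def commentify_alt (input_string : String) (lang : String) : String :=
  if lang == "py" then commentB input_string "# "
  else if lang == "c" then commentB input_string "// "
  else "" -- Python raises NotImplementedError here; excluded by Pre_commentify

-- ===== PRECONDITION & SPEC =====
-- Pre_ excludes exactly the languages on which A (and B) raise NotImplementedError.
def Pre_commentify (_input_string : String) (lang : String) : Prop :=
  lang = "py" ∨ lang = "c"
instance (input_string : String) (lang : String) : Decidable (Pre_commentify input_string lang) := by
  unfold Pre_commentify; infer_instance

def pvWitness_commentify : String × String := ("hi\nthere", "py")

def Spec_commentify (input_string : String) (lang : String) (out : String) : Prop :=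
  out = commentify_alt input_string lang
instance (input_string : String) (lang : String) (out : String) : Decidable (Spec_commentify input_string lang out) := by
  unfold Spec_commentify; infer_instance

-- ===== CLAIM =====
def Claim_equal_commentify : Prop := ∀ (input_string : String) (lang : String), Dom_commentify input_string lang → Pre_commentify input_string lang → Spec_commentify input_string lang (commentify input_string lang)

-- ===== LEMMAS AND PROOFS =====

-- clean recursive form of replace s "\n" ('\n' :: m)
def pvRepl (m : List Char) : List Char → List Char
  | [] => []
  | c :: t => if c = '\n' then '\n' :: m ++ pvRepl m t else c :: pvRepl m t

-- clean recursive form of splitOn at '\n' with the current (unreversed) line pre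
def pvSp (pre : List Char) : List Char → List (List Char)
  | [] => [pre]
  | c :: t => if c = '\n' then pre :: pvSp [] t else pvSp (pre ++ [c]) t

theorem pvSp_ne_nil (l pre : List Char) : pvSp pre l ≠ [] := by
  induction l generalizing pre with
  | nil => simp [pvSp]
  | cons c t ih => simp only [pvSp]; split_ifs <;> simp [ih]

theorem pvReplace_go (m : List Char) :
    ∀ (fuel : Nat) (l acc : List Char), l.length ≤ fuel →
      PySem.Chars.replace.go ['\n'] ('\n' :: m) fuel l acc = acc.reverse ++ pvRepl m l := by
  intro fuel
  induction fuel with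
  | zero =>
    intro l acc h
    have : l = [] := List.length_eq_zero_iff.mp (Nat.le_zero.mp h)
    subst this; simp [PySem.Chars.replace.go, pvRepl]
  | succ f ih =>
    intro l acc h
    cases l with
    | nil => simp [PySem.Chars.replace.go, pvRepl]
    | cons c t =>
      simp only [PySem.Chars.replace.go]
      by_cases hc : c = '\n'
      · subst hc
        simp only [List.isPrefixOf, beq_self_eq_true, Bool.true_and, if_pos]
        rw [show (['\n'] : List Char).length = 1 from rfl, List.drop_one, List.tail_cons,
          ih t _ (by simpa using h)]
        simp [pvRepl]
      · have hpre : (['\n'] : List Char).isPrefixOf (c :: t) = false := by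
          simp [List.isPrefixOf]; exact fun hcc => (hc hcc.symm).elim
        simp only [hpre, Bool.false_eq_true, if_false]
        rw [ih t _ (by simpa using h)]
        simp [pvRepl, hc]

theorem pvSplit_go :
    ∀ (fuel : Nat) (l cur : List Char) (accs : List (List Char)), l.length < fuel →
      PySem.Chars.splitOn.go ['\n'] fuel l cur accs = accs.reverse ++ pvSp cur.reverse l := by
  intro fuel
  induction fuel with
  | zero => intro l cur accs h; omega
  | succ f ih =>
    intro l cur accs h
    cases l with
    | nil => simp [PySem.Chars.splitOn.go, pvSp]
    | cons c t =>
      simp only [PySem.Chars.splitOn.go]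
      by_cases hc : c = '\n'
      · subst hc
        simp only [List.isPrefixOf, beq_self_eq_true, Bool.true_and, if_pos]
        rw [show (['\n'] : List Char).length = 1 from rfl, List.drop_one, List.tail_cons,
          ih t [] _ (by simpa using h)]
        simp [pvSp]
      · have hpre : (['\n'] : List Char).isPrefixOf (c :: t) = false := by
          simp [List.isPrefixOf]; exact fun hcc => (hc hcc.symm).elim
        simp only [hpre, Bool.false_eq_true, if_false]
        rw [ih t (c :: cur) _ (by simpa using h)]
        simp [pvSp, hc]

theorem pvSplitOn_eq (l : List Char) : PySem.Chars.splitOn l ['\n'] = pvSp [] l := by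
  unfold PySem.Chars.splitOn
  rw [pvSplit_go (l.length + 1) l [] [] (by omega)]
  rfl

theorem pvJoin_sp (m : List Char) :
    ∀ (l pre : List Char),
      PySem.Chars.join ['\n'] ((pvSp pre l).map (fun x => m ++ x)) = m ++ pre ++ pvRepl m l := by
  intro l
  induction l with
  | nil => intro pre; simp [pvSp, pvRepl, PySem.Chars.join, List.intercalate]
  | cons c t ih =>
    intro pre
    by_cases hc : c = '\n'
    · subst hc
      simp only [pvSp, if_true]
      obtain ⟨q, rest, hq⟩ : ∃ q rest, pvSp ([] : List Char) t = q :: rest := by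
        cases hs : pvSp ([] : List Char) t with
        | nil => exact absurd hs (pvSp_ne_nil t [])
        | cons q rest => exact ⟨q, rest, rfl⟩
      rw [List.map_cons, hq, List.map_cons, PySem.Chars.join_cons_cons, ← List.map_cons, ← hq, ih]
      simp [pvRepl]
    · simp only [pvSp, if_neg hc]
      rw [ih]
      simp [pvRepl, hc]

theorem pvChars_main (m l : List Char) :
    PySem.Chars.join ['\n'] ((PySem.Chars.splitOn l ['\n']).map (fun x => m ++ x)) =
      m ++ PySem.Chars.replace l ['\n'] ('\n' :: m) := by
  rw [pvSplitOn_eq, pvJoin_sp]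
  have : PySem.Chars.replace l ['\n'] ('\n' :: m) = pvRepl m l := by
    unfold PySem.Chars.replace
    rw [if_neg (by simp), pvReplace_go m l.length l [] le_rfl]
    rfl
  rw [this]; simp

theorem pvStr_main (m i : String) :
    PySem.Str.join "\n" (((PySem.Str.split? i "\n").getD []).map (fun line => m ++ line)) =
      m ++ PySem.Str.replace i "\n" ("\n" ++ m) := by
  obtain ⟨ls, hls⟩ : ∃ ls, PySem.Str.split? i "\n" = some ls := by
    have h := PySem.Str.split?_map i "\n"
    cases hs : PySem.Str.split? i "\n" with
    | none =>
      rw [hs] at h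
      simp only [Option.map_none] at h
      exact absurd h.symm (by simp [PySem.Chars.split?, show ("\n" : String).toList = ['\n'] from rfl])
    | some ls => exact ⟨ls, rfl⟩
  have hmap : ls.map String.toList = PySem.Chars.splitOn i.toList ['\n'] := by
    have h := PySem.Str.split?_map i "\n"
    rw [hls] at h
    simpa [PySem.Chars.split?, show ("\n" : String).toList = ['\n'] from rfl] using h
  rw [hls, Option.getD_some]
  have htl : (PySem.Str.join "\n" (ls.map (fun line => m ++ line))).toList =
      (m ++ PySem.Str.replace i "\n" ("\n" ++ m)).toList := by
    show (String.ofList (PySem.Chars.join ("\n" : String).toList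
        ((ls.map (fun line => m ++ line)).map String.toList))).toList = _
    rw [String.toList_ofList]
    have : (ls.map (fun line => m ++ line)).map String.toList =
        (PySem.Chars.splitOn i.toList ['\n']).map (fun x => m.toList ++ x) := by
      rw [← hmap, List.map_map, List.map_map]
      simp [Function.comp, String.toList_append]
    rw [show ("\n" : String).toList = ['\n'] from rfl, this, pvChars_main]
    simp [String.toList_append, PySem.Str.toList_replace,
      show ("\n" ++ m).toList = '\n' :: m.toList by simp [String.toList_append]]
  calc PySem.Str.join "\n" (ls.map (fun line => m ++ line))
      = String.ofList (PySem.Str.join "\n" (ls.map (fun line => m ++ line))).toList := String.ofList_toList.symm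
    _ = _ := by rw [htl, String.ofList_toList]

-- ===== VERDICT =====
theorem commentify_spec : Claim_equal_commentify := by
  intro i l _ hpre
  unfold Spec_commentify commentify commentify_alt commentB
  rcases hpre with h | h <;> subst h <;> simp [pvStr_main]
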